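-- pv_equiv track=rewrite | github.com/MillPRE/Programmers-Algorithm | 코딩 기초 트레이닝/세 개의 구분자-p181862/세 개의 구분자.py | solution
-- ===== SOURCE A (Python) =====
-- def solution(myStr):
--     answer = []
--     sub = ''
--
--     myStr = list(myStr)
--     for s in myStr:
--         if not s in ['a', 'b', 'c']:
--             sub += s
--         elif len(sub) > 0:
--             answer.append(sub)
--             sub = ''
--
--     if len(sub) > 0 :
--         answer.append(sub)
--
--     return ['EMPTY'] if len(answer) == 0 else answer
-- ===== SOURCE B (Python) =====
-- import re
--
-- def solution(myStr):
--     runs = re.findall(r'[^abc]+', myStr)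
--     return runs if runs else ['EMPTY']
-- ===== Notes on version B (the rewrite author's own statement) =====
-- stated objective: idiomatic
-- what changed: Replaced the manual per-character accumulate/flush loop and trailing-run special case with a single regex findall of maximal runs of non-delimiter characters.
import Mathlib
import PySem

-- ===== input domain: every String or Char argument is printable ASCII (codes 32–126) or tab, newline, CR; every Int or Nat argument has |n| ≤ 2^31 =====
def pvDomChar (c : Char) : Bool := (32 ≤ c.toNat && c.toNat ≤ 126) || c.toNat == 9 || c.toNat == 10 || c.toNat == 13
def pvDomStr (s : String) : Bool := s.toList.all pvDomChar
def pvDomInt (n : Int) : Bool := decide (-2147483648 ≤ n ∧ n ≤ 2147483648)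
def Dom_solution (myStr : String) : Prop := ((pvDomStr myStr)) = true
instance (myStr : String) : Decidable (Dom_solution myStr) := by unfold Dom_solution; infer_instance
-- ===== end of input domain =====

-- B replaces A's manual accumulate/flush loop with a regex-style extraction of the
-- maximal runs of non-'abc' characters (objective: idiomatic).

-- ===== PORT A =====
-- the loop body: accumulate into sub, flush sub into answer on a delimiter
def solStep (p : List String × List Char) (s : Char) : List String × List Char :=
  if ¬ (s = 'a' ∨ s = 'b' ∨ s = 'c') then (p.1, p.2 ++ [s])
  else if p.2.length > 0 then (p.1 ++ [String.ofList p.2], []) else p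

def solution (myStr : String) : List String :=
  let p := myStr.toList.foldl solStep ([], [])
  let answer := if p.2.length > 0 then p.1 ++ [String.ofList p.2] else p.1
  if answer.length = 0 then ["EMPTY"] else answer

-- ===== PORT B =====
-- transcription of re.findall(r'[^abc]+', s): scan left to right, emitting each
-- maximal run of non-delimiter characters (pending = the run matched so far)
def findRuns : List Char → List Char → List String
  | pending, [] => if pending = [] then [] else [String.ofList pending]
  | pending, c :: rest =>
    if c = 'a' ∨ c = 'b' ∨ c = 'c' then
      (if pending = [] then [] else [String.ofList pending]) ++ findRuns [] rest
    else findRuns (pending ++ [c]) rest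

def solution_alt (myStr : String) : List String :=
  let runs := findRuns [] myStr.toList
  if runs = [] then ["EMPTY"] else runs

-- ===== PRECONDITION & SPEC =====
def Spec_solution (myStr : String) (out : List String) : Prop := out = solution_alt myStr
instance (myStr : String) (out : List String) : Decidable (Spec_solution myStr out) := by unfold Spec_solution; infer_instance

-- ===== CLAIM (what is proved, stated in full; the proofs are below) =====
def Claim_equal_solution : Prop := ∀ (myStr : String), Dom_solution myStr → Spec_solution myStr (solution myStr)

-- ===== LEMMAS AND PROOFS =====
-- A's fold, finished by the trailing flush, yields exactly the runs B extracts.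
lemma fold_eq_findRuns (cs : List Char) : ∀ (ans : List String) (sub : List Char),
    (let p := cs.foldl solStep (ans, sub);
     if p.2.length > 0 then p.1 ++ [String.ofList p.2] else p.1) = ans ++ findRuns sub cs := by
  induction cs with
  | nil =>
    intro ans sub
    simp only [List.foldl_nil, findRuns]
    by_cases h : sub = [] <;> simp [h, List.length_pos_iff]
  | cons c rest ih =>
    intro ans sub
    simp only [List.foldl_cons, findRuns]
    by_cases hd : c = 'a' ∨ c = 'b' ∨ c = 'c'
    · by_cases hs : sub = []
      · simp [solStep, hd, hs, ih]
      · have : sub.length > 0 := List.length_pos_iff.mpr hs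
        simp [solStep, hd, hs, this, ih, List.append_assoc]
    · simp [solStep, hd, ih]

theorem solution_eq (myStr : String) : solution myStr = solution_alt myStr := by
  unfold solution solution_alt
  simp only []
  rw [show (let p := myStr.toList.foldl solStep ([], []);
      if p.2.length > 0 then p.1 ++ [String.ofList p.2] else p.1) = [] ++ findRuns [] myStr.toList
    from fold_eq_findRuns myStr.toList [] []]
  simp [List.length_eq_zero_iff]

-- ===== VERDICT (by name: the statement is the Claim_ definition above) =====
theorem solution_spec : Claim_equal_solution := by
  intro myStr _
  unfold Spec_solution
  exact solution_eq myStr
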